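-- pv_equiv track=rewrite | github.com/f0lie/pali_translations | convert_pali_json_to_txt.py | format_sutta
-- ===== SOURCE A (Python) =====
-- def format_sutta(data: dict) -> str:
--     """
--     Formats sutta data from a dictionary into a more readable translation format.
--     """
--     output = ""
--
--     sutta_current = ""
--     for tag_segment_num, text in data.items():
--         sutta, segment_num = tag_segment_num.split(":")
--         if sutta_current != sutta:
--             output += f"[SUTTA {sutta}]\n\n"
--             sutta_current = sutta
--         output += f"{text.strip()} [{segment_num}]\n\n"
--
--     return output.strip()
-- ===== SOURCE B (Python) =====
-- def format_sutta(data: dict) -> str: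
--     """
--     Formats sutta data from a dictionary into a more readable translation format.
--     """
--     texts = [text.strip() for text in data.values()]
--     pairs = [(sutta, num) for sutta, num in (key.split(":") for key in data)]
--     suttas = [sutta for sutta, _ in pairs]
--     headers = ["" if sutta == prev else f"[SUTTA {sutta}]\n\n"
--                for sutta, prev in zip(suttas, [""] + suttas)]
--     bodies = [f"{text} [{num}]\n\n" for (_, num), text in zip(pairs, texts)]
--     return "".join(h + b for h, b in zip(headers, bodies)).strip()
-- ===== Notes on version B (the rewrite author's own statement) =====
-- stated objective: alternative
-- what changed: Replaces the single stateful loop (mutable sutta_current flag, conditional header, string +=) by a stateless staged pipeline: split all keys, compute the per-position header by zipping the sutta list with itself shifted by one (prepending ""), render bodies independently, and join the interleaved pieces once.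
import Mathlib
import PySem

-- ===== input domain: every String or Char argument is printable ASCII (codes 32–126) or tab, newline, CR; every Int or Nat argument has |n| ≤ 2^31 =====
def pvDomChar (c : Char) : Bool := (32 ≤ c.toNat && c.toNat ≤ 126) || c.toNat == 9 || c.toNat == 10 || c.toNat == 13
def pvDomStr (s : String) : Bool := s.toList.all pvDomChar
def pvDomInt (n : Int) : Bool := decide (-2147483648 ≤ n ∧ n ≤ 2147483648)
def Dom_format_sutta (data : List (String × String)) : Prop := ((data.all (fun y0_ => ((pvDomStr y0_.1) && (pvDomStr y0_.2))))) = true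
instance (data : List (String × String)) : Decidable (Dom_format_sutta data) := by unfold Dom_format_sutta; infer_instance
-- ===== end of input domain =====

-- B replaces A's stateful loop (mutable sutta_current, conditional header, string +=)
-- by a stateless staged pipeline: split all keys, decide each header by zipping the
-- sutta list with itself shifted by one, render bodies independently, join once.

-- ===== PORT A =====
-- the two f-strings of the Python source
def fsHeader (sutta : List Char) : List Char := "[SUTTA ".toList ++ sutta ++ "]\n\n".toList
def fsSeg (text : String) (segment_num : List Char) : List Char :=
  PySem.Chars.strip text.toList ++ " [".toList ++ segment_num ++ "]\n\n".toList

-- one iteration of A's loop; the `| _` branch is where Python raises ValueError (excluded by Pre_)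
def fsStepA (st : List Char × List Char) (kv : String × String) : List Char × List Char :=
  match PySem.Chars.splitOn kv.1.toList ":".toList with
  | [sutta, segment_num] =>
      let st' := if st.2 ≠ sutta then (st.1 ++ fsHeader sutta, sutta) else st
      (st'.1 ++ fsSeg kv.2 segment_num, st'.2)
  | _ => st

def format_sutta (data : List (String × String)) : String :=
  String.ofList (PySem.Chars.strip (data.foldl fsStepA ([], [])).1)

-- ===== PORT B =====
-- key.split(":") unpacked into (sutta, num); `| _` is Python's ValueError (excluded by Pre_)
def fsPair (key : String) : List Char × List Char :=
  match PySem.Chars.splitOn key.toList ":".toList with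
  | [sutta, num] => (sutta, num)
  | _ => ([], [])

def format_sutta_alt (data : List (String × String)) : String :=
  let texts := data.map fun kv => PySem.Chars.strip kv.2.toList
  let pairs := data.map fun kv => fsPair kv.1
  let suttas := pairs.map Prod.fst
  let headers := (suttas.zip ([] :: suttas)).map
    fun sp => if sp.1 = sp.2 then [] else fsHeader sp.1
  let bodies := (pairs.zip texts).map
    fun pt => pt.2 ++ " [".toList ++ pt.1.2 ++ "]\n\n".toList
  String.ofList (PySem.Chars.strip (((headers.zip bodies).map fun hb => hb.1 ++ hb.2).flatten))

-- ===== PRECONDITION & SPEC =====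
-- Pre_ excludes exactly the inputs on which A raises ValueError: a key whose number of ':' is not 1
-- makes `sutta, segment_num = tag_segment_num.split(":")` fail to unpack.
def Pre_format_sutta (data : List (String × String)) : Prop :=
  ∀ kv ∈ data, kv.1.toList.count ':' = 1
instance (data : List (String × String)) : Decidable (Pre_format_sutta data) := by
  unfold Pre_format_sutta; infer_instance

def pvWitness_format_sutta : (List (String × String)) := [("mn1:1", " hi "), ("mn1:2", "x"), ("mn2:1", "y")]

def Spec_format_sutta (data : List (String × String)) (out : String) : Prop :=
  out = format_sutta_alt data
instance (data : List (String × String)) (out : String) : Decidable (Spec_format_sutta data out) := by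
  unfold Spec_format_sutta; infer_instance

-- ===== CLAIM (what is proved, stated in full; the proofs are below) =====
def Claim_equal_format_sutta : Prop := ∀ (data : List (String × String)), Dom_format_sutta data → Pre_format_sutta data → Spec_format_sutta data (format_sutta data)

-- ===== LEMMAS AND PROOFS =====

-- common functional description both ports are reduced to
def fsRender (prev : List Char) : List (String × String) → List Char
  | [] => []
  | kv :: rest =>
      (if (fsPair kv.1).1 = prev then [] else fsHeader (fsPair kv.1).1) ++
        fsSeg kv.2 (fsPair kv.1).2 ++ fsRender (fsPair kv.1).1 rest

theorem pv_count_one_split (cs : List Char) (h : cs.count ':' = 1) :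
    ∃ a b, cs = a ++ ':' :: b ∧ ':' ∉ a ∧ ':' ∉ b := by
  induction cs with
  | nil => simp at h
  | cons c rest ih =>
    by_cases hc : c = ':'
    · subst hc
      have h0 : rest.count ':' = 0 := by simp at h; omega
      exact ⟨[], rest, rfl, by simp, by simpa using List.count_eq_zero.mp h0⟩
    · have h1 : rest.count ':' = 1 := by simpa [List.count_cons, hc] using h
      obtain ⟨a, b, heq, ha, hb⟩ := ih h1
      refine ⟨c :: a, b, by simp [heq], ?_, hb⟩
      intro hmem
      rcases List.mem_cons.mp hmem with h' | h'
      · exact hc h'.symm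
      · exact ha h'

theorem pv_go_no_colon (l : List Char) (hl : ':' ∉ l) :
    ∀ (fuel : Nat), l.length ≤ fuel → ∀ (cur : List Char) (acc : List (List Char)),
    PySem.Chars.splitOn.go [':'] fuel l cur acc = ((cur.reverse ++ l) :: acc).reverse := by
  induction l with
  | nil => intro fuel hf cur acc; cases fuel <;> simp [PySem.Chars.splitOn.go]
  | cons c rest ih =>
    intro fuel hf cur acc
    cases fuel with
    | zero => simp at hf
    | succ f =>
      have hc : ¬ ([':'].isPrefixOf (c :: rest) = true) := by
        simp [List.isPrefixOf]
        intro h; exact hl (h ▸ List.mem_cons_self)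
      rw [PySem.Chars.splitOn.go, if_neg hc]
      have hrest : ':' ∉ rest := fun h => hl (List.mem_cons_of_mem _ h)
      rw [ih hrest f (by simpa using Nat.le_of_succ_le_succ hf) (c :: cur) acc]
      simp

theorem pv_go_colon (a b : List Char) (ha : ':' ∉ a) (hb : ':' ∉ b) :
    ∀ (fuel : Nat), a.length + b.length + 1 ≤ fuel → ∀ (cur : List Char) (acc : List (List Char)),
    PySem.Chars.splitOn.go [':'] fuel (a ++ ':' :: b) cur acc =
      acc.reverse ++ [cur.reverse ++ a, b] := by
  induction a with
  | nil =>
    intro fuel hf cur acc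
    cases fuel with
    | zero => omega
    | succ f =>
      have hpre : [':'].isPrefixOf (':' :: b) = true := by simp [List.isPrefixOf]
      have hdrop : List.drop [':'].length (':' :: b) = b := rfl
      rw [List.nil_append, PySem.Chars.splitOn.go, if_pos hpre, hdrop]
      rw [pv_go_no_colon b hb f (by simp at hf; omega) [] (cur.reverse :: acc)]
      simp
  | cons c a' ih =>
    intro fuel hf cur acc
    cases fuel with
    | zero => omega
    | succ f =>
      have hc : c ≠ ':' := fun h => ha (h ▸ List.mem_cons_self)
      have hpre : ¬ ([':'].isPrefixOf (c :: (a' ++ ':' :: b)) = true) := by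
        simp [List.isPrefixOf]
        intro h; exact hc h.symm
      rw [List.cons_append, PySem.Chars.splitOn.go, if_neg hpre]
      have ha' : ':' ∉ a' := fun h => ha (List.mem_cons_of_mem _ h)
      rw [ih ha' f (by simp at hf ⊢; omega) (c :: cur) acc]
      simp

theorem pv_splitOn_colon (a b : List Char) (ha : ':' ∉ a) (hb : ':' ∉ b) :
    PySem.Chars.splitOn (a ++ ':' :: b) ":".toList = [a, b] := by
  have hsep : ":".toList = [':'] := by decide
  rw [hsep]
  unfold PySem.Chars.splitOn
  rw [pv_go_colon a b ha hb _ (by simp) [] []]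
  simp

-- on a one-colon key, split really yields the pair fsPair extracts
theorem pv_key_pair (key : String) (h : key.toList.count ':' = 1) :
    PySem.Chars.splitOn key.toList ":".toList = [(fsPair key).1, (fsPair key).2] := by
  obtain ⟨a, b, heq, ha, hb⟩ := pv_count_one_split key.toList h
  have hs : PySem.Chars.splitOn key.toList ":".toList = [a, b] := by
    rw [heq]; exact pv_splitOn_colon a b ha hb
  have hp : fsPair key = (a, b) := by unfold fsPair; rw [hs]
  rw [hs, hp]

-- A's fold computes fsRender
theorem pv_foldA (data : List (String × String))
    (hpre : ∀ kv ∈ data, kv.1.toList.count ':' = 1) :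
    ∀ (out cur : List Char),
    (data.foldl fsStepA (out, cur)).1 = out ++ fsRender cur data := by
  induction data with
  | nil => intro out cur; simp [fsRender]
  | cons kv rest ih =>
    intro out cur
    have hs := pv_key_pair kv.1 (hpre kv List.mem_cons_self)
    have hstep : fsStepA (out, cur) kv =
        (out ++ (if (fsPair kv.1).1 = cur then [] else fsHeader (fsPair kv.1).1) ++
          fsSeg kv.2 (fsPair kv.1).2, (fsPair kv.1).1) := by
      unfold fsStepA
      rw [hs]
      have hne : ((fsPair kv.1).1 = cur) = (cur = (fsPair kv.1).1) :=
        propext ⟨Eq.symm, Eq.symm⟩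
      by_cases hc : cur = (fsPair kv.1).1
      · simp [hc]
      · simp [hc, hne]
    rw [List.foldl_cons, hstep,
      ih (fun kv' hm => hpre kv' (List.mem_cons_of_mem _ hm)) _ _]
    simp [fsRender, List.append_assoc]

-- B's zipped pipeline computes fsRender (prev generalises the `[""] + suttas` shift)
theorem pv_pipeB (data : List (String × String)) :
    ∀ (prev : List Char),
    List.flatten
      ((((((data.map fun kv => fsPair kv.1).map Prod.fst).zip
            (prev :: (data.map fun kv => fsPair kv.1).map Prod.fst)).map
          (fun sp => if sp.1 = sp.2 then ([] : List Char) else fsHeader sp.1)).zip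
        (((data.map fun kv => fsPair kv.1).zip
            (data.map fun kv => PySem.Chars.strip kv.2.toList)).map
          fun pt => pt.2 ++ " [".toList ++ pt.1.2 ++ "]\n\n".toList)).map
        (fun hb : List Char × List Char => hb.1 ++ hb.2)) = fsRender prev data := by
  induction data with
  | nil => intro prev; simp [fsRender]
  | cons kv rest ih =>
    intro prev
    simp only [List.map_cons, List.zip_cons_cons, List.flatten_cons, fsRender]
    rw [ih (fsPair kv.1).1]
    simp [fsSeg, List.append_assoc]

-- ===== VERDICT (by name: the statement is the Claim_ definition above) =====
theorem format_sutta_spec : Claim_equal_format_sutta := by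
  intro data _hdom hpre
  show format_sutta data = format_sutta_alt data
  unfold format_sutta format_sutta_alt
  simp only []
  rw [pv_foldA data hpre [] [], pv_pipeB data [], List.nil_append]
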